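-- pv_equiv track=rewrite | github.com/applehell/contextpilot | src/gui/memory_diff_dialog.py | _compute_diff_lines
-- ===== SOURCE A (Python) =====
-- from typing import List, Optional
--
-- def _compute_diff_lines(old: str, new: str) -> List[tuple]:
--     """Simple line-by-line diff. Returns [(type, line), ...] where type is '+', '-', or ' '."""
--     old_lines = old.splitlines() if old else []
--     new_lines = new.splitlines()
--
--     result: List[tuple] = []
--
--     # Simple LCS-based diff
--     m, n = len(old_lines), len(new_lines)
--     dp = [[0] * (n + 1) for _ in range(m + 1)]
--     for i in range(m):
--         for j in range(n):
--             if old_lines[i] == new_lines[j]: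
--                 dp[i + 1][j + 1] = dp[i][j] + 1
--             else:
--                 dp[i + 1][j + 1] = max(dp[i][j + 1], dp[i + 1][j])
--
--     i, j = m, n
--     ops = []
--     while i > 0 or j > 0:
--         if i > 0 and j > 0 and old_lines[i - 1] == new_lines[j - 1]:
--             ops.append((' ', old_lines[i - 1]))
--             i -= 1
--             j -= 1
--         elif j > 0 and (i == 0 or dp[i][j - 1] >= dp[i - 1][j]):
--             ops.append(('+', new_lines[j - 1]))
--             j -= 1
--         else:
--             ops.append(('-', old_lines[i - 1]))
--             i -= 1
--     ops.reverse()
--     return ops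
-- ===== SOURCE B (Python) =====
-- def _compute_diff_lines(old: str, new: str) -> list:
--     """Top-down memoized LCS recursion + recursive backtrack (no bottom-up table, no reverse)."""
--     old_lines = old.splitlines() if old else []
--     new_lines = new.splitlines()
--     memo = {}
--
--     def lcs(i, j):
--         if i == 0 or j == 0:
--             return 0
--         key = (i, j)
--         if key not in memo:
--             if old_lines[i - 1] == new_lines[j - 1]:
--                 memo[key] = lcs(i - 1, j - 1) + 1
--             else:
--                 memo[key] = max(lcs(i, j - 1), lcs(i - 1, j))
--         return memo[key]
--
--     def diff(i, j):
--         if i == 0 and j == 0: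
--             return []
--         if i > 0 and j > 0 and old_lines[i - 1] == new_lines[j - 1]:
--             return diff(i - 1, j - 1) + [(' ', old_lines[i - 1])]
--         if j > 0 and (i == 0 or lcs(i, j - 1) >= lcs(i - 1, j)):
--             return diff(i, j - 1) + [('+', new_lines[j - 1])]
--         return diff(i - 1, j) + [('-', old_lines[i - 1])]
--
--     return diff(len(old_lines), len(new_lines))
-- ===== Notes on version B (the rewrite author's own statement) =====
-- stated objective: alternative
-- what changed: Replaces the bottom-up (m+1)x(n+1) DP table plus backward while-loop-and-reverse with a top-down memoized lcs(i,j) recursion and a recursive backtrack that computes only the LCS entries the walk actually needs and builds the diff in final order without a reverse.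
import Mathlib
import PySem

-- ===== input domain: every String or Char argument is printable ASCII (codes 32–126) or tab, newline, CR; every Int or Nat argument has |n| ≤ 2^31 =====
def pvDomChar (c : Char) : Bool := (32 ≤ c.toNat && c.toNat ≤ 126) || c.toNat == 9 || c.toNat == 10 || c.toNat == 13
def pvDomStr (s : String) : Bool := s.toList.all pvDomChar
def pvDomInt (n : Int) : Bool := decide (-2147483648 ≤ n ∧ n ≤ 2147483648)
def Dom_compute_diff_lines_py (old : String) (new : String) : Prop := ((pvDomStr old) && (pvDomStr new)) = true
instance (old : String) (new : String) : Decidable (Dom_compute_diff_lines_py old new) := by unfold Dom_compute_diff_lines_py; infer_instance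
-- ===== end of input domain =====

-- B replaces A's bottom-up DP table + backward loop + reverse by a top-down memoized
-- lcs recursion plus a recursive backtrack emitting the diff in final order (objective: alternative).

-- ===== PORT A =====
-- dp[i][j] lookup; all indices used by A are in range, so getD's defaults are never returned.
def get2 (dp : List (List Int)) (i j : Nat) : Int := (dp.getD i []).getD j 0

-- body of A's inner 'for j in range(n)' loop (dp[i+1][j+1] = …)
def dpStep (ol nl : List String) (i : Nat) (dp : List (List Int)) (j : Nat) : List (List Int) :=
  let v : Int := if ol.getD i "" = nl.getD j "" then get2 dp i j + 1
                 else max (get2 dp i (j+1)) (get2 dp (i+1) j)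
  dp.set (i+1) ((dp.getD (i+1) []).set (j+1) v)

-- body of A's outer 'for i in range(m)' loop
def dpRow (ol nl : List String) (n : Nat) (dp : List (List Int)) (i : Nat) : List (List Int) :=
  (List.range n).foldl (dpStep ol nl i) dp

-- A's backward while-loop: appends ops, caller reverses (exactly as the Python).
def walkA (dp : List (List Int)) (ol nl : List String) (i j : Nat) (ops : List (String × String)) :
    List (String × String) :=
  if h0 : 0 < i ∨ 0 < j then
    if h1 : 0 < i ∧ 0 < j ∧ ol.getD (i-1) "" = nl.getD (j-1) "" then
      walkA dp ol nl (i-1) (j-1) (ops ++ [(" ", ol.getD (i-1) "")])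
    else if h2 : 0 < j ∧ (i = 0 ∨ get2 dp (i-1) j ≤ get2 dp i (j-1)) then
      walkA dp ol nl i (j-1) (ops ++ [("+", nl.getD (j-1) "")])
    else
      walkA dp ol nl (i-1) j (ops ++ [("-", ol.getD (i-1) "")])
  else ops
termination_by i + j
decreasing_by
  · obtain ⟨hi, hj, -⟩ := h1; omega
  · obtain ⟨hj, -⟩ := h2; omega
  · rcases h0 with hi | hj
    · omega
    · by_cases hi : 0 < i
      · omega
      · exact absurd ⟨hj, Or.inl (by omega)⟩ h2

def compute_diff_lines_py (old : String) (new : String) : List (String × String) :=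
  let old_lines := if old = "" then [] else PySem.Str.splitlines old
  let new_lines := PySem.Str.splitlines new
  let m := old_lines.length
  let n := new_lines.length
  let dp0 : List (List Int) := List.replicate (m+1) (List.replicate (n+1) (0 : Int))
  let dp := (List.range m).foldl (dpRow old_lines new_lines n) dp0
  (walkA dp old_lines new_lines m n []).reverse

-- ===== PORT B =====
-- memoized top-down lcs(i, j): the Python's memo dict is threaded through explicitly
def lcsB (ol nl : List String) (i j : Nat) (memo : PySem.Dict (Nat × Nat) Int) :
    Int × PySem.Dict (Nat × Nat) Int :=
  if h0 : i = 0 ∨ j = 0 then (0, memo)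
  else
    match memo.get? (i, j) with
    | some v => (v, memo)
    | none =>
      if ol.getD (i-1) "" = nl.getD (j-1) "" then
        let r := lcsB ol nl (i-1) (j-1) memo
        (r.1 + 1, r.2.insert (i, j) (r.1 + 1))
      else
        let r1 := lcsB ol nl i (j-1) memo
        let r2 := lcsB ol nl (i-1) j r1.2
        (max r1.1 r2.1, r2.2.insert (i, j) (max r1.1 r2.1))
termination_by i + j
decreasing_by all_goals omega

-- B's recursive backtrack (the short-circuit `i == 0 or lcs(i,j-1) >= lcs(i-1,j)` is expanded)
def diffB (ol nl : List String) (i j : Nat) (memo : PySem.Dict (Nat × Nat) Int) :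
    List (String × String) × PySem.Dict (Nat × Nat) Int :=
  if h0 : i = 0 ∧ j = 0 then ([], memo)
  else if h1 : 0 < i ∧ 0 < j ∧ ol.getD (i-1) "" = nl.getD (j-1) "" then
    let r := diffB ol nl (i-1) (j-1) memo
    (r.1 ++ [(" ", ol.getD (i-1) "")], r.2)
  else if h2 : 0 < j then
    if h3 : i = 0 then
      let r := diffB ol nl i (j-1) memo
      (r.1 ++ [("+", nl.getD (j-1) "")], r.2)
    else
      let r1 := lcsB ol nl i (j-1) memo
      let r2 := lcsB ol nl (i-1) j r1.2
      if r2.1 ≤ r1.1 then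
        let r := diffB ol nl i (j-1) r2.2
        (r.1 ++ [("+", nl.getD (j-1) "")], r.2)
      else
        let r := diffB ol nl (i-1) j r2.2
        (r.1 ++ [("-", ol.getD (i-1) "")], r.2)
  else
    let r := diffB ol nl (i-1) j memo
    (r.1 ++ [("-", ol.getD (i-1) "")], r.2)
termination_by i + j
decreasing_by all_goals omega

def compute_diff_lines_py_alt (old : String) (new : String) : List (String × String) :=
  let old_lines := if old = "" then [] else PySem.Str.splitlines old
  let new_lines := PySem.Str.splitlines new
  (diffB old_lines new_lines old_lines.length new_lines.length PySem.Dict.empty).1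

-- ===== PRECONDITION & SPEC =====
def Spec_compute_diff_lines_py (old : String) (new : String) (out : List (String × String)) : Prop := out = compute_diff_lines_py_alt old new
instance (old : String) (new : String) (out : List (String × String)) : Decidable (Spec_compute_diff_lines_py old new out) := by unfold Spec_compute_diff_lines_py; infer_instance

-- ===== CLAIM (what is proved, stated in full; the proofs are below) =====
def Claim_equal_compute_diff_lines_py : Prop := ∀ (old : String) (new : String), Dom_compute_diff_lines_py old new → Spec_compute_diff_lines_py old new (compute_diff_lines_py old new)

-- ===== LEMMAS AND PROOFS =====

-- pure reference LCS value (prefix lengths i, j)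
def Lr (ol nl : List String) (i j : Nat) : Int :=
  if h0 : i = 0 ∨ j = 0 then 0
  else if ol.getD (i-1) "" = nl.getD (j-1) "" then Lr ol nl (i-1) (j-1) + 1
  else max (Lr ol nl i (j-1)) (Lr ol nl (i-1) j)
termination_by i + j
decreasing_by all_goals omega

-- pure reference backtrack
def Dref (ol nl : List String) (i j : Nat) : List (String × String) :=
  if h0 : i = 0 ∧ j = 0 then []
  else if h1 : 0 < i ∧ 0 < j ∧ ol.getD (i-1) "" = nl.getD (j-1) "" then
    Dref ol nl (i-1) (j-1) ++ [(" ", ol.getD (i-1) "")]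
  else if h2 : 0 < j ∧ (i = 0 ∨ Lr ol nl (i-1) j ≤ Lr ol nl i (j-1)) then
    Dref ol nl i (j-1) ++ [("+", nl.getD (j-1) "")]
  else
    Dref ol nl (i-1) j ++ [("-", ol.getD (i-1) "")]
termination_by i + j
decreasing_by
  · obtain ⟨hi, hj, -⟩ := h1; omega
  · obtain ⟨hj, -⟩ := h2; omega
  · by_cases hi : 0 < i
    · omega
    · exact absurd ⟨by omega, Or.inl (by omega)⟩ h2

-- memo invariant: every cached value is the true LCS value
def InvM (ol nl : List String) (memo : PySem.Dict (Nat × Nat) Int) : Prop :=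
  ∀ p v, memo.get? p = some v → v = Lr ol nl p.1 p.2

theorem InvM_insert (ol nl : List String) (memo : PySem.Dict (Nat × Nat) Int)
    (h : InvM ol nl memo) (i j : Nat) (v : Int) (hv : v = Lr ol nl i j) :
    InvM ol nl (memo.insert (i, j) v) := by
  intro p w hw
  rw [PySem.Dict.get?_insert] at hw
  split at hw
  · rename_i hp; cases hw; subst hp; simpa using hv
  · exact h p w hw

theorem lcsB_correct (ol nl : List String) (k : Nat) :
    ∀ i j memo, i + j ≤ k → InvM ol nl memo →
      (lcsB ol nl i j memo).1 = Lr ol nl i j ∧ InvM ol nl (lcsB ol nl i j memo).2 := by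
  induction k with
  | zero =>
    intro i j memo hk hInv
    have hi : i = 0 := by omega
    rw [lcsB, Lr]
    simp [hi]
    exact hInv
  | succ k ih =>
    intro i j memo hk hInv
    rw [lcsB]
    by_cases h0 : i = 0 ∨ j = 0
    · rw [Lr]; simp [h0]; exact hInv
    · simp only [dif_neg h0]
      rcases hmem : memo.get? (i, j) with _ | v
      · by_cases hs : ol.getD (i-1) "" = nl.getD (j-1) ""
        · simp only [if_pos hs]
          obtain ⟨hv, hI⟩ := ih (i-1) (j-1) memo (by omega) hInv
          have hLr : Lr ol nl i j = Lr ol nl (i-1) (j-1) + 1 := by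
            rw [Lr, dif_neg h0, if_pos hs]
          refine ⟨by simp [hv, hLr], ?_⟩
          exact InvM_insert ol nl _ hI i j _ (by rw [hv, hLr])
        · simp only [if_neg hs]
          obtain ⟨hv1, hI1⟩ := ih i (j-1) memo (by omega) hInv
          obtain ⟨hv2, hI2⟩ := ih (i-1) j _ (by omega) hI1
          have hLr : Lr ol nl i j = max (Lr ol nl i (j-1)) (Lr ol nl (i-1) j) := by
            rw [Lr, dif_neg h0, if_neg hs]
          refine ⟨by simp [hv1, hv2, hLr], ?_⟩
          exact InvM_insert ol nl _ hI2 i j _ (by rw [hv1, hv2, hLr])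
      · exact ⟨(hInv (i, j) v hmem).symm ▸ rfl, hInv⟩

theorem diffB_correct (ol nl : List String) (k : Nat) :
    ∀ i j memo, i + j ≤ k → InvM ol nl memo →
      (diffB ol nl i j memo).1 = Dref ol nl i j := by
  induction k with
  | zero =>
    intro i j memo hk hInv
    have hi : i = 0 := by omega
    have hj : j = 0 := by omega
    rw [diffB, Dref]
    simp [hi, hj]
  | succ k ih =>
    intro i j memo hk hInv
    rw [diffB, Dref]
    by_cases h0 : i = 0 ∧ j = 0
    · simp [h0]
    · rw [dif_neg h0, dif_neg h0]
      by_cases h1 : 0 < i ∧ 0 < j ∧ ol.getD (i-1) "" = nl.getD (j-1) ""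
      · rw [dif_pos h1, dif_pos h1]
        simp only
        rw [ih (i-1) (j-1) memo (by omega) hInv]
      · rw [dif_neg h1, dif_neg h1]
        by_cases h2 : 0 < j
        · rw [dif_pos h2]
          by_cases h3 : i = 0
          · rw [dif_pos h3, dif_pos (show 0 < j ∧ (i = 0 ∨ Lr ol nl (i-1) j ≤ Lr ol nl i (j-1)) from ⟨h2, Or.inl h3⟩)]
            simp only
            rw [ih i (j-1) memo (by omega) hInv]
          · rw [dif_neg h3]
            obtain ⟨hv1, hI1⟩ := lcsB_correct ol nl (i + j) i (j-1) memo (by omega) hInv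
            obtain ⟨hv2, hI2⟩ := lcsB_correct ol nl (i + j) (i-1) j _ (by omega) hI1
            by_cases hc : Lr ol nl (i-1) j ≤ Lr ol nl i (j-1)
            · rw [if_pos (by rw [hv1, hv2]; exact hc),
                dif_pos (show 0 < j ∧ (i = 0 ∨ Lr ol nl (i-1) j ≤ Lr ol nl i (j-1)) from ⟨h2, Or.inr hc⟩)]
              simp only
              rw [ih i (j-1) _ (by omega) hI2]
            · rw [if_neg (by rw [hv1, hv2]; exact hc),
                dif_neg (show ¬(0 < j ∧ (i = 0 ∨ Lr ol nl (i-1) j ≤ Lr ol nl i (j-1))) from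
                  fun h => by rcases h.2 with h' | h'; exact h3 h'; exact hc h')]
              simp only
              rw [ih (i-1) j _ (by omega) hI2]
        · rw [dif_neg h2, dif_neg (show ¬(0 < j ∧ (i = 0 ∨ Lr ol nl (i-1) j ≤ Lr ol nl i (j-1))) from fun h => h2 h.1)]
          simp only
          rw [ih (i-1) j memo (by omega) hInv]

theorem Lr_left_zero (ol nl : List String) (j : Nat) : Lr ol nl 0 j = 0 := by
  rw [Lr]; simp

theorem Lr_right_zero (ol nl : List String) (i : Nat) : Lr ol nl i 0 = 0 := by
  rw [Lr]; simp

theorem list_getD_set {α : Type} (l : List α) (a k : Nat) (v d : α) :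
    (l.set a v).getD k d = if a = k ∧ a < l.length then v else l.getD k d := by
  rw [List.getD_eq_getElem?_getD, List.getD_eq_getElem?_getD, List.getElem?_set]
  by_cases h1 : a = k
  · subst h1
    by_cases h2 : a < l.length
    · simp [h2]
    · simp [h2, List.getElem?_eq_none (by omega : l.length ≤ a)]
  · simp [h1]

-- loop invariant for A's table fill: rows ≤ r are final, row r+1 is final up to column c, the rest is still 0
def TInv (ol nl : List String) (r c : Nat) (dp : List (List Int)) : Prop :=
  dp.length = ol.length + 1 ∧
  (∀ i, i ≤ ol.length → (dp.getD i []).length = nl.length + 1) ∧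
  (∀ i j, i ≤ ol.length → j ≤ nl.length →
     get2 dp i j = if i ≤ r ∨ (i = r + 1 ∧ j ≤ c) then Lr ol nl i j else 0)

theorem TInv_init (ol nl : List String) :
    TInv ol nl 0 0 (List.replicate (ol.length+1) (List.replicate (nl.length+1) (0 : Int))) := by
  refine ⟨by simp, ?_, ?_⟩
  · intro i hi
    rw [List.getD_eq_getElem?_getD, List.getElem?_replicate, if_pos (by omega)]
    simp
  · intro i j hi hj
    have hz : get2 (List.replicate (ol.length+1) (List.replicate (nl.length+1) (0 : Int))) i j = 0 := by
      simp [get2, List.getD_eq_getElem?_getD, List.getElem?_replicate]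
      split_ifs <;> simp
    rw [hz]
    split_ifs with h
    · rcases h with h | ⟨h, hj0⟩
      · have : i = 0 := by omega
        subst this; rw [Lr_left_zero]
      · have : j = 0 := by omega
        subst this; rw [Lr_right_zero]
    · rfl

theorem TInv_step (ol nl : List String) (r c : Nat) (dp : List (List Int))
    (hr : r < ol.length) (hc : c < nl.length) (h : TInv ol nl r c dp) :
    TInv ol nl r (c+1) (dpStep ol nl r dp c) := by
  obtain ⟨hlen, hrow, hval⟩ := h
  have hvLr : (if ol.getD r "" = nl.getD c "" then get2 dp r c + 1
      else max (get2 dp r (c+1)) (get2 dp (r+1) c)) = Lr ol nl (r+1) (c+1) := by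
    have e1 : get2 dp r c = Lr ol nl r c := by
      rw [hval r c (by omega) (by omega)]; simp
    have e2 : get2 dp r (c+1) = Lr ol nl r (c+1) := by
      rw [hval r (c+1) (by omega) (by omega)]; simp
    have e3 : get2 dp (r+1) c = Lr ol nl (r+1) c := by
      rw [hval (r+1) c (by omega) (by omega)]; simp
    rw [e1, e2, e3]
    rw [show Lr ol nl (r+1) (c+1) = if ol.getD ((r+1)-1) "" = nl.getD ((c+1)-1) ""
          then Lr ol nl ((r+1)-1) ((c+1)-1) + 1
          else max (Lr ol nl (r+1) ((c+1)-1)) (Lr ol nl ((r+1)-1) (c+1)) from by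
      rw [Lr, dif_neg (by omega)]]
    simp only [Nat.add_sub_cancel]
    split_ifs with hs
    · rfl
    · exact (max_comm _ _)
  unfold dpStep
  simp only
  set v : Int := if ol.getD r "" = nl.getD c "" then get2 dp r c + 1
      else max (get2 dp r (c+1)) (get2 dp (r+1) c) with hv
  set row' : List Int := (dp.getD (r+1) []).set (c+1) v with hrow'
  have hrowlen : row'.length = nl.length + 1 := by
    rw [hrow', List.length_set]; exact hrow (r+1) (by omega)
  refine ⟨by rw [List.length_set]; exact hlen, ?_, ?_⟩
  · intro i hi
    rw [list_getD_set]
    split_ifs with hcase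
    · exact hrowlen
    · exact hrow i hi
  · intro i j hi hj
    have hget : get2 (dp.set (r+1) row') i j =
        if r+1 = i ∧ r+1 < dp.length then row'.getD j 0 else get2 dp i j := by
      unfold get2
      rw [list_getD_set]
      split_ifs <;> rfl
    rw [hget]
    by_cases hieq : i = r + 1
    · subst hieq
      rw [if_pos ⟨rfl, by omega⟩]
      rw [hrow', list_getD_set]
      have hlr : (dp.getD (r+1) []).length = nl.length + 1 := hrow (r+1) (by omega)
      by_cases hjeq : j = c + 1
      · subst hjeq
        rw [if_pos ⟨rfl, by omega⟩, if_pos (by omega)]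
        exact hvLr
      · rw [if_neg (by omega)]
        have h2 := hval (r+1) j (by omega) hj
        unfold get2 at h2
        rw [h2]
        split_ifs with ha hb <;> first | rfl | omega
    · rw [if_neg (by omega), hval i j hi hj]
      split_ifs with ha hb <;> first | rfl | omega

theorem TInv_inner (ol nl : List String) (r : Nat) (hr : r < ol.length) :
    ∀ k c dp, c + k = nl.length → TInv ol nl r c dp →
      TInv ol nl r nl.length ((List.range' c k).foldl (dpStep ol nl r) dp) := by
  intro k
  induction k with
  | zero =>
    intro c dp hck h
    simpa using (by rw [show c = nl.length by omega] at h; exact h)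
  | succ k ih =>
    intro c dp hck h
    rw [List.range'_succ, List.foldl_cons]
    exact ih (c+1) _ (by omega) (TInv_step ol nl r c dp hr (by omega) h)

theorem TInv_rowdone (ol nl : List String) (r : Nat) (dp : List (List Int))
    (h : TInv ol nl r nl.length dp) : TInv ol nl (r+1) 0 dp := by
  obtain ⟨hlen, hrow, hval⟩ := h
  refine ⟨hlen, hrow, ?_⟩
  intro i j hi hj
  rw [hval i j hi hj]
  split_ifs with ha hb
  · rfl
  · omega
  · have : j = 0 := by omega
    subst this
    rw [Lr_right_zero]
  · rfl

theorem TInv_outer (ol nl : List String) :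
    ∀ k r dp, r + k = ol.length → TInv ol nl r 0 dp →
      ∀ i j, i ≤ ol.length → j ≤ nl.length →
        get2 ((List.range' r k).foldl (dpRow ol nl nl.length) dp) i j = Lr ol nl i j := by
  intro k
  induction k with
  | zero =>
    intro r dp hrk h i j hi hj
    obtain ⟨-, -, hval⟩ := h
    simp only [List.range'_zero, List.foldl_nil]
    rw [hval i j hi hj, if_pos (Or.inl (by omega))]
  | succ k ih =>
    intro r dp hrk h i j hi hj
    rw [List.range'_succ, List.foldl_cons]
    refine ih (r+1) _ (by omega) ?_ i j hi hj
    have hinner := TInv_inner ol nl r (by omega) nl.length 0 dp (by omega) h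
    unfold dpRow
    rw [List.range_eq_range']
    exact TInv_rowdone ol nl r _ hinner

theorem table_correct (ol nl : List String) :
    ∀ i j, i ≤ ol.length → j ≤ nl.length →
      get2 ((List.range ol.length).foldl (dpRow ol nl nl.length)
        (List.replicate (ol.length+1) (List.replicate (nl.length+1) (0 : Int)))) i j
      = Lr ol nl i j := by
  intro i j hi hj
  rw [List.range_eq_range']
  exact TInv_outer ol nl ol.length 0 _ (by omega) (TInv_init ol nl) i j hi hj

theorem walkA_correct (dp : List (List Int)) (ol nl : List String)
    (hdp : ∀ i j, i ≤ ol.length → j ≤ nl.length → get2 dp i j = Lr ol nl i j) (k : Nat) :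
    ∀ i j acc, i ≤ ol.length → j ≤ nl.length → i + j ≤ k →
      walkA dp ol nl i j acc = acc ++ (Dref ol nl i j).reverse := by
  induction k with
  | zero =>
    intro i j acc hi hj hk
    have h1 : i = 0 := by omega
    have h2 : j = 0 := by omega
    rw [walkA, Dref]
    simp [h1, h2]
  | succ k ih =>
    intro i j acc hi hj hk
    rw [walkA, Dref]
    by_cases h0 : 0 < i ∨ 0 < j
    · rw [dif_pos h0, dif_neg (show ¬(i = 0 ∧ j = 0) by omega)]
      by_cases h1 : 0 < i ∧ 0 < j ∧ ol.getD (i-1) "" = nl.getD (j-1) ""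
      · rw [dif_pos h1, dif_pos h1, ih (i-1) (j-1) _ (by omega) (by omega) (by omega)]
        simp
      · rw [dif_neg h1, dif_neg h1]
        have e1 : get2 dp (i-1) j = Lr ol nl (i-1) j := hdp _ _ (by omega) hj
        have e2 : get2 dp i (j-1) = Lr ol nl i (j-1) := hdp _ _ hi (by omega)
        by_cases h2 : 0 < j ∧ (i = 0 ∨ Lr ol nl (i-1) j ≤ Lr ol nl i (j-1))
        · rw [dif_pos (by rw [e1, e2]; exact h2), dif_pos h2,
            ih i (j-1) _ hi (by omega) (by omega)]
          simp
        · rw [dif_neg (by rw [e1, e2]; exact h2), dif_neg h2,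
            ih (i-1) j _ (by omega) hj (by omega)]
          simp
    · rw [dif_neg h0, dif_pos (show i = 0 ∧ j = 0 by omega)]
      simp

-- ===== VERDICT (by name: the statement is the Claim_ definition above) =====
theorem compute_diff_lines_py_spec : Claim_equal_compute_diff_lines_py := by
  intro old new _
  unfold Spec_compute_diff_lines_py compute_diff_lines_py compute_diff_lines_py_alt
  dsimp only
  set ol := if old = "" then [] else PySem.Str.splitlines old with hol
  set nl := PySem.Str.splitlines new with hnl
  have hempty : InvM ol nl PySem.Dict.empty := by
    intro p v h
    simp [PySem.Dict.empty, PySem.Dict.get?] at h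
  rw [walkA_correct _ ol nl (table_correct ol nl) (ol.length + nl.length) ol.length nl.length []
      le_rfl le_rfl le_rfl,
    diffB_correct ol nl (ol.length + nl.length) ol.length nl.length PySem.Dict.empty le_rfl hempty]
  simp
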